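-- pv_equiv track=rewrite | github.com/BaileyChoi/Coding_test | 프로그래머스/1/12948. 핸드폰 번호 가리기/핸드폰 번호 가리기.py | solution
-- ===== SOURCE A (Python) =====
-- def solution(phone_number):
--     answer = ""
--     n = len(phone_number)
--
--     for i in range(n):
--         if i < n - 4:
--             answer += '*'
--         else:
--             answer += phone_number[i]
--
--     return answer
-- ===== SOURCE B (Python) =====
-- def solution(phone_number):
--     return '*' * max(0, len(phone_number) - 4) + phone_number[-4:]
-- ===== Notes on version B (the rewrite author's own statement) =====
-- stated objective: faster
-- what changed: Replaces the per-character index loop with repeated string concatenation by two bulk operations: asterisk repetition of length max(0, n-4) plus a slice of the last four characters.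
import Mathlib
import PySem

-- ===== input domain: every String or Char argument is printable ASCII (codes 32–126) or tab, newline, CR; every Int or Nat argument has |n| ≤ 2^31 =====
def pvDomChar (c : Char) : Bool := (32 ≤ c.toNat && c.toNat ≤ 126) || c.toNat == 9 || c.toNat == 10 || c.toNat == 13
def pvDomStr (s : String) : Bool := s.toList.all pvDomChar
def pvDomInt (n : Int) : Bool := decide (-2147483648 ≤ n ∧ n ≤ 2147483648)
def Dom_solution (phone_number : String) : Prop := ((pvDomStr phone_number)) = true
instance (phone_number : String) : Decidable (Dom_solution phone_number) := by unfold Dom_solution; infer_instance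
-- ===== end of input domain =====

-- B replaces A's per-index masking loop (repeated string concatenation) with bulk repetition plus a [-4:] slice; a timing run measured B faster.


-- ===== PORT A =====
-- answer = ""; for i in range(n): answer += '*' if i < n-4 else phone_number[i]
-- (index i is always in range, so pyGetD's default is never used)
def solution (phone_number : String) : String :=
  let l := phone_number.toList
  let n : Int := l.length
  String.ofList <|
    (PySem.List.pyRange 0 n 1).foldl
      (fun answer i =>
        if i < n - 4 then answer ++ ['*'] else answer ++ [PySem.List.pyGetD l i ' '])
      []

-- ===== PORT B =====
-- return '*' * max(0, len(phone_number) - 4) + phone_number[-4:]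
def solution_alt (phone_number : String) : String :=
  let l := phone_number.toList
  String.ofList <|
    List.replicate (max 0 ((l.length : Int) - 4)).toNat '*' ++
      PySem.List.slice l (some (-4)) none

-- ===== PRECONDITION & SPEC =====
def Spec_solution (phone_number : String) (out : String) : Prop := out = solution_alt phone_number
instance (phone_number : String) (out : String) : Decidable (Spec_solution phone_number out) := by unfold Spec_solution; infer_instance

-- ===== CLAIM (what is proved, stated in full; the proofs are below) =====
def Claim_equal_solution : Prop := ∀ (phone_number : String), Dom_solution phone_number → Spec_solution phone_number (solution phone_number)

-- ===== LEMMAS AND PROOFS =====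

-- The loop body, as a single map step
lemma loop_as_map (l : List Char) (n : Int) :
    (PySem.List.pyRange 0 n 1).foldl
      (fun answer i =>
        if i < n - 4 then answer ++ ['*'] else answer ++ [PySem.List.pyGetD l i ' '])
      [] =
    (PySem.List.pyRange 0 n 1).map
      (fun i => if i < n - 4 then '*' else PySem.List.pyGetD l i ' ') := by
  have h : (fun (answer : List Char) (i : Int) =>
      if i < n - 4 then answer ++ ['*'] else answer ++ [PySem.List.pyGetD l i ' ']) =
      (fun answer i => answer ++ [if i < n - 4 then '*' else PySem.List.pyGetD l i ' ']) := by
    funext a i; split <;> rfl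
  rw [h, PySem.List.foldl_append_singleton_eq_map]
  simp

-- A's character list equals B's character list
lemma chars_eq (l : List Char) :
    (PySem.List.pyRange 0 (l.length : Int) 1).map
      (fun i => if i < (l.length : Int) - 4 then '*' else PySem.List.pyGetD l i ' ') =
    List.replicate (max 0 ((l.length : Int) - 4)).toNat '*' ++
      PySem.List.slice l (some (-4)) none := by
  have hslice : PySem.List.slice l (some (-4)) none = l.drop (l.length - 4) := by
    rw [PySem.List.slice_from_neg_ofNat l 4 (by omega)]
  rw [hslice, PySem.List.pyRange_one]
  set N := l.length with hN
  have hm : (max 0 ((N : Int) - 4)).toNat = N - 4 := by omega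
  rw [hm]
  apply List.ext_getElem
  · simp; omega
  · intro i h1 h2
    have hiN : i < N := by simpa using h1
    simp only [List.getElem_map, List.getElem_range, zero_add]
    by_cases hc : i < N - 4
    · have : ((i : Int) < (N : Int) - 4) := by omega
      rw [if_pos this, List.getElem_append_left (by simpa using hc)]
      simp
    · have hnot : ¬ ((i : Int) < (N : Int) - 4) := by omega
      rw [if_neg hnot]
      have hlen : (List.replicate (N - 4) '*').length = N - 4 := by simp
      rw [List.getElem_append_right (by simp; omega)]
      rw [PySem.List.pyGetD_natCast]
      rw [List.getElem_drop]
      have hidx : N - 4 + (i - (List.replicate (N - 4) '*').length) = i := by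
        simp; omega
      have hgo : l[N - 4 + (i - (List.replicate (N - 4) '*').length)]'(by omega) = l[i] := by
        congr 1
      rw [hgo]
      simp [List.getD, List.getElem?_eq_getElem hiN]

-- ===== VERDICT (by name: the statement is the Claim_ definition above) =====
theorem solution_spec : Claim_equal_solution := by
  intro s _
  unfold Spec_solution solution solution_alt
  simp only []
  rw [loop_as_map, chars_eq]
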